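-- pv_equiv track=rewrite | github.com/AzeezRazak/recon | clean.py | categorize_by_severity
-- ===== SOURCE A (Python) =====
-- def categorize_by_severity(data):
--     categorized_data = {"critical": [], "high": [], "medium": [], "low": []}
--
--     for entry in data:
--         severity = entry.get('severity', 'low')  # Assume 'low' if not provided
--         if severity == "critical":
--             categorized_data["critical"].append(entry)
--         elif severity == "high":
--             categorized_data["high"].append(entry)
--         elif severity == "medium":
--             categorized_data["medium"].append(entry)
--         else:
--             categorized_data["low"].append(entry)
--     return categorized_data
-- ===== SOURCE B (Python) =====
-- def categorize_by_severity(data):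
--     critical = [e for e in data if e.get('severity', 'low') == "critical"]
--     high = [e for e in data if e.get('severity', 'low') == "high"]
--     medium = [e for e in data if e.get('severity', 'low') == "medium"]
--     low = [e for e in data if e.get('severity', 'low') not in ("critical", "high", "medium")]
--     return {"critical": critical, "high": high, "medium": medium, "low": low}
-- ===== Notes on version B (the rewrite author's own statement) =====
-- stated objective: alternative
-- what changed: Replaces the single dispatch loop that appends each entry into a mutable four-bucket dict with four independent filtering passes that each build one bucket directly (low via negated membership to cover the default and unknown severities).
import Mathlib
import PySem

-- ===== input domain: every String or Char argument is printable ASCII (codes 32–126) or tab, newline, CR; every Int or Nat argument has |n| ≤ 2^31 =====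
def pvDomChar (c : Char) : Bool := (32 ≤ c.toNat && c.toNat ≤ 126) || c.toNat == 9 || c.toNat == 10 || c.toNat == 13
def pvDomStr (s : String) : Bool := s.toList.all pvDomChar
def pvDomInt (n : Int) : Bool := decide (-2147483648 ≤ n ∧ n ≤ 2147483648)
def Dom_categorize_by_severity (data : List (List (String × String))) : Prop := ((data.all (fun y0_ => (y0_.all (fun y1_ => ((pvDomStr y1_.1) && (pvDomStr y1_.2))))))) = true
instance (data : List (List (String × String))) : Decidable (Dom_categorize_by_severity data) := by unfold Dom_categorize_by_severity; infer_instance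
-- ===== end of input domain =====

-- B replaces A's single dispatch loop into a mutable four-bucket dict by four independent
-- filtering passes, one per bucket (objective: alternative decomposition, same cost).

-- ===== PORT A =====
-- entry.get('severity', 'low') on the assoc-list dict (first match, default "low")
def pvSeverity (entry : List (String × String)) : String :=
  (PySem.Dict.mk entry).getD "severity" "low"

-- one iteration of A's loop (dispatch entry into its bucket)
def pvStep (d : PySem.Dict String (List (List (String × String))))
    (entry : List (String × String)) : PySem.Dict String (List (List (String × String))) :=
  let severity := pvSeverity entry
  if severity == "critical" then d.modify "critical" [] (· ++ [entry])
  else if severity == "high" then d.modify "high" [] (· ++ [entry])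
  else if severity == "medium" then d.modify "medium" [] (· ++ [entry])
  else d.modify "low" [] (· ++ [entry])

def categorize_by_severity (data : List (List (String × String))) :
    List (String × List (List (String × String))) :=
  (data.foldl pvStep
    ((((PySem.Dict.empty.insert "critical" []).insert "high" []).insert "medium" []).insert "low" [])).items

-- ===== PORT B =====
def categorize_by_severity_alt (data : List (List (String × String))) :
    List (String × List (List (String × String))) :=
  let critical := data.filter (fun e => pvSeverity e == "critical")
  let high := data.filter (fun e => pvSeverity e == "high")
  let medium := data.filter (fun e => pvSeverity e == "medium")
  let low := data.filter (fun e =>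
    !(pvSeverity e == "critical" || pvSeverity e == "high" || pvSeverity e == "medium"))
  [("critical", critical), ("high", high), ("medium", medium), ("low", low)]

-- ===== PRECONDITION & SPEC =====
def Spec_categorize_by_severity (data : List (List (String × String))) (out : List (String × List (List (String × String)))) : Prop := out = categorize_by_severity_alt data
instance (data : List (List (String × String))) (out : List (String × List (List (String × String)))) : Decidable (Spec_categorize_by_severity data out) := by unfold Spec_categorize_by_severity; infer_instance

-- ===== CLAIM (what is proved, stated in full; the proofs are below) =====
def Claim_equal_categorize_by_severity : Prop := ∀ (data : List (List (String × String))), Dom_categorize_by_severity data → Spec_categorize_by_severity data (categorize_by_severity data)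

-- ===== LEMMAS AND PROOFS =====

-- the accumulator dict always has exactly the four fixed keys
def pvD4 (c h m l : List (List (String × String))) :
    PySem.Dict String (List (List (String × String))) :=
  PySem.Dict.mk [("critical", c), ("high", h), ("medium", m), ("low", l)]

lemma pvD4_init :
    (((PySem.Dict.empty.insert "critical" ([] : List (List (String × String)))).insert "high" []).insert "medium" []).insert "low" []
      = pvD4 [] [] [] [] := by
  decide

lemma pvD4_modify_critical (c h m l : List (List (String × String))) (f : _ → _) :
    (pvD4 c h m l).modify "critical" [] f = pvD4 (f c) h m l := by
  simp [pvD4, PySem.Dict.modify, PySem.Dict.getD_eq_get?_getD, PySem.Dict.get?_mk_cons,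
    PySem.Dict.insert, PySem.Dict.contains]

lemma pvD4_modify_high (c h m l : List (List (String × String))) (f : _ → _) :
    (pvD4 c h m l).modify "high" [] f = pvD4 c (f h) m l := by
  simp [pvD4, PySem.Dict.modify, PySem.Dict.getD_eq_get?_getD, PySem.Dict.get?_mk_cons,
    PySem.Dict.insert, PySem.Dict.contains]

lemma pvD4_modify_medium (c h m l : List (List (String × String))) (f : _ → _) :
    (pvD4 c h m l).modify "medium" [] f = pvD4 c h (f m) l := by
  simp [pvD4, PySem.Dict.modify, PySem.Dict.getD_eq_get?_getD, PySem.Dict.get?_mk_cons,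
    PySem.Dict.insert, PySem.Dict.contains]

lemma pvD4_modify_low (c h m l : List (List (String × String))) (f : _ → _) :
    (pvD4 c h m l).modify "low" [] f = pvD4 c h m (f l) := by
  simp [pvD4, PySem.Dict.modify, PySem.Dict.getD_eq_get?_getD, PySem.Dict.get?_mk_cons,
    PySem.Dict.insert, PySem.Dict.contains]

lemma pvLoop (data : List (List (String × String))) (c h m l : List (List (String × String))) :
    data.foldl pvStep (pvD4 c h m l)
    = pvD4 (c ++ data.filter (fun e => pvSeverity e == "critical"))
           (h ++ data.filter (fun e => pvSeverity e == "high"))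
           (m ++ data.filter (fun e => pvSeverity e == "medium"))
           (l ++ data.filter (fun e =>
              !(pvSeverity e == "critical" || pvSeverity e == "high" || pvSeverity e == "medium"))) := by
  induction data generalizing c h m l with
  | nil => simp
  | cons e rest ih =>
    rw [List.foldl_cons]
    by_cases hc : pvSeverity e == "critical"
    · rw [show pvStep (pvD4 c h m l) e = pvD4 (c ++ [e]) h m l from by
        simp [pvStep, hc, pvD4_modify_critical], ih]
      simp [show pvSeverity e = "critical" from by simpa using hc]
    · by_cases hh : pvSeverity e == "high"
      · rw [show pvStep (pvD4 c h m l) e = pvD4 c (h ++ [e]) m l from by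
          simp [pvStep, hc, hh, pvD4_modify_high], ih]
        simp [hc, show pvSeverity e = "high" from by simpa using hh]
      · by_cases hm : pvSeverity e == "medium"
        · rw [show pvStep (pvD4 c h m l) e = pvD4 c h (m ++ [e]) l from by
            simp [pvStep, hc, hh, hm, pvD4_modify_medium], ih]
          simp [hc, hh, hm]
        · rw [show pvStep (pvD4 c h m l) e = pvD4 c h m (l ++ [e]) from by
            simp [pvStep, hc, hh, hm, pvD4_modify_low], ih]
          simp [hc, hh, hm]

-- ===== VERDICT (by name: the statement is the Claim_ definition above) =====
theorem categorize_by_severity_spec : Claim_equal_categorize_by_severity := by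
  intro data _
  show categorize_by_severity data = categorize_by_severity_alt data
  unfold categorize_by_severity categorize_by_severity_alt
  rw [pvD4_init, pvLoop]
  simp [pvD4]
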